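-- pv_equiv track=rewrite | github.com/Teerapat1234/SPwebsite | sp/calculate/views.py | Calsir
-- ===== SOURCE A (Python) =====
-- def Calsir(postNumPerDay):
--     I0 = postNumPerDay[len(postNumPerDay) - 1]
--     S0 = postNumPerDay[len(postNumPerDay) - 2] - I0
--     R0, i, MaxNum = 0, 1, 0
--     while i < len(postNumPerDay):
--         if postNumPerDay[i] > MaxNum:
--             MaxNum = postNumPerDay[i]
--         else:
--             R0 = R0 + (MaxNum - postNumPerDay[i])
--         i += 3
--     n = S0 + I0 + R0
--     return n, S0, I0, R0
-- ===== SOURCE B (Python) =====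
-- def Calsir(postNumPerDay):
--     I0 = postNumPerDay[len(postNumPerDay) - 1]
--     S0 = postNumPerDay[len(postNumPerDay) - 2] - I0
--     sub = postNumPerDay[1::3]
--     cummax = []
--     m = 0
--     for x in sub:
--         m = max(m, x)
--         cummax.append(m)
--     R0 = sum(m - x for m, x in zip(cummax, sub))
--     n = S0 + I0 + R0
--     return n, S0, I0, R0
-- ===== Notes on version B (the rewrite author's own statement) =====
-- stated objective: idiomatic
-- what changed: Replaces the index-stepping while loop with an if/else state machine by a strided slice [1::3], an explicit cumulative-max list seeded at 0, and a zip/sum of (running max - value); I0/S0 keep the same index arithmetic.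
import Mathlib
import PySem

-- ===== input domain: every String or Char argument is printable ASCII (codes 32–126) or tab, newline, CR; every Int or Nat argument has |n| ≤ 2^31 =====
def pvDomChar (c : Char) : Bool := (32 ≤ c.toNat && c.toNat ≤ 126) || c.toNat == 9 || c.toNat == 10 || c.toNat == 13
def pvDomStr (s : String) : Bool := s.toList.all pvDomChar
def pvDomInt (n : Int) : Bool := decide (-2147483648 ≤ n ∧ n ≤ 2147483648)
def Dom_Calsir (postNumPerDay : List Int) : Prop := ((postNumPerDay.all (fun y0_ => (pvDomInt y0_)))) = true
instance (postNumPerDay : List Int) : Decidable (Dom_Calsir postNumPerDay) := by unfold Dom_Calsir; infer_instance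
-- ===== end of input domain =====

-- B replaces the index-stepping while loop by a strided slice [1::3], a cumulative-max
-- list seeded at 0 and a zip/sum — an idiomatic decomposition of the same O(n) task.

-- ===== PORT A =====
-- while i < len(postNumPerDay): … ; i += 3   (i is always a valid index when read)
def CalsirLoopA (xs : List Int) (i : Nat) (R0 MaxNum : Int) : Int × Int :=
  if i < xs.length then
    let x := PySem.List.pyGetD xs (i : Int) 0
    if x > MaxNum then CalsirLoopA xs (i + 3) R0 x
    else CalsirLoopA xs (i + 3) (R0 + (MaxNum - x)) MaxNum
  else (R0, MaxNum)
termination_by xs.length - i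

def Calsir (postNumPerDay : List Int) : Int × Int × Int × Int :=
  match PySem.List.pyGet? postNumPerDay ((postNumPerDay.length : Int) - 1),
        PySem.List.pyGet? postNumPerDay ((postNumPerDay.length : Int) - 2) with
  | some I0, some v =>
      let S0 := v - I0
      let p := CalsirLoopA postNumPerDay 1 0 0
      let R0 := p.1
      let n := S0 + I0 + R0
      (n, S0, I0, R0)
  | _, _ => (0, 0, 0, 0)   -- IndexError (empty list); excluded by Pre_Calsir

-- ===== PORT B =====
def Calsir_alt (postNumPerDay : List Int) : Int × Int × Int × Int :=
  match PySem.List.pyGet? postNumPerDay ((postNumPerDay.length : Int) - 1) with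
  | none => (0, 0, 0, 0)   -- IndexError (empty list); excluded by Pre_Calsir
  | some I0 =>
    match PySem.List.pyGet? postNumPerDay ((postNumPerDay.length : Int) - 2) with
    | none => (0, 0, 0, 0)   -- IndexError; excluded by Pre_Calsir
    | some v =>
      let S0 := v - I0
      let sub := (PySem.List.slice? postNumPerDay (some 1) none 3).getD []
      let cummax := (sub.foldl
        (fun (acc : List Int × Int) x =>
          let m := max acc.2 x
          (acc.1 ++ [m], m)) ([], 0)).1
      let R0 := (cummax.zip sub).foldl (fun a p => a + (p.1 - p.2)) 0
      let n := S0 + I0 + R0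
      (n, S0, I0, R0)

-- ===== PRECONDITION & SPEC =====
-- Python A raises IndexError exactly on the empty list.
def Pre_Calsir (postNumPerDay : List Int) : Prop := postNumPerDay ≠ []
instance (postNumPerDay : List Int) : Decidable (Pre_Calsir postNumPerDay) := by unfold Pre_Calsir; infer_instance
def pvWitness_Calsir : List Int := ([1, 2, 3])

def Spec_Calsir (postNumPerDay : List Int) (out : Int × Int × Int × Int) : Prop := out = Calsir_alt postNumPerDay
instance (postNumPerDay : List Int) (out : Int × Int × Int × Int) : Decidable (Spec_Calsir postNumPerDay out) := by unfold Spec_Calsir; infer_instance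

-- ===== CLAIM (what is proved, stated in full; the proofs are below) =====
def Claim_equal_Calsir : Prop := ∀ (postNumPerDay : List Int), Dom_Calsir postNumPerDay → Pre_Calsir postNumPerDay → Spec_Calsir postNumPerDay (Calsir postNumPerDay)

-- ===== LEMMAS AND PROOFS =====

-- every third element of the list, starting with its head
def stride3 : List Int → List Int
  | [] => []
  | x :: t => x :: stride3 (t.drop 2)
termination_by l => l.length
decreasing_by simp

-- recursive mirror of A's loop on the strided sublist
def foldA : List Int → Int → Int → Int × Int
  | [], R, M => (R, M)
  | x :: t, R, M => if x > M then foldA t R x else foldA t (R + (M - x)) M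

-- cumulative max including the current element, seeded at M
def cmax : Int → List Int → List Int
  | _, [] => []
  | M, x :: t => max M x :: cmax (max M x) t

-- Σ (running max − x), seeded at M
def smax : Int → List Int → Int
  | _, [] => 0
  | M, x :: t => (max M x - x) + smax (max M x) t

theorem stride3_drop_eq (xs : List Int) : ∀ (n i : Nat), xs.length - i = n →
    List.filterMap (fun k => xs[i + 3 * k]?) (List.range ((xs.length - i + 2) / 3)) =
      stride3 (xs.drop i) := by
  intro n
  induction n using Nat.strong_induction_on with
  | _ n ih =>
    intro i hn
    by_cases h : i < xs.length
    · have hc : (xs.length - i + 2) / 3 = (xs.length - (i + 3) + 2) / 3 + 1 := by omega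
      rw [hc, List.range_succ_eq_map, List.filterMap_cons, List.filterMap_map]
      have h0 : xs[i + 3 * 0]? = some xs[i] := by simp [h]
      have hstr : stride3 (xs.drop i) = xs[i] :: stride3 (xs.drop (i + 3)) := by
        rw [List.drop_eq_getElem_cons h]
        simp only [stride3, List.drop_drop]
      rw [hstr]
      simp only [Nat.mul_zero, Nat.add_zero] at h0 ⊢
      rw [h0]
      have hrec := ih (xs.length - (i + 3)) (by omega) (i + 3) rfl
      have hf : ((fun k => xs[i + 3 * k]?) ∘ Nat.succ) = (fun k => xs[i + 3 + 3 * k]?) := by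
        funext k
        simp only [Function.comp]
        congr 1
        omega
      rw [hf, hrec]
    · have h1 : xs.drop i = [] := by
        apply List.drop_eq_nil_of_le; omega
      have h2 : (xs.length - i + 2) / 3 = 0 := by omega
      simp [h1, h2, stride3]

theorem slice3_eq (xs : List Int) :
    PySem.List.slice? xs (some 1) none 3 = some (stride3 xs.tail) := by
  simp [PySem.List.slice?, PySem.List.sliceIndices]
  match xs with
  | [] => simp [stride3]
  | [x] => simp [stride3]
  | x :: y :: t =>
    have h1 : min (1 : Int) (((x :: y :: t).length : Int)) = 1 := by
      simp only [List.length_cons]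
      push_cast
      omega
    rw [h1]
    rw [if_pos (show 1 < (x :: y :: t).length by simp)]
    have hC : ((((x :: y :: t).length : Int) - 1 + 3 - 1) / 3).toNat
        = ((x :: y :: t).length - 1 + 2) / 3 := by
      simp only [List.length_cons]
      omega
    rw [hC]
    have H := stride3_drop_eq (x :: y :: t) ((x :: y :: t).length - 1) 1 rfl
    have hidx : ∀ k : Nat, ((1 : Int) + 3 * (k : Int)).toNat = 1 + 3 * k := by
      intro k
      omega
    have hf : (fun k : Nat => (x :: y :: t)[(1 + 3 * (k : Int)).toNat]?)
        = (fun k : Nat => (x :: y :: t)[1 + 3 * k]?) := by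
      funext k
      rw [hidx k]
    rw [hf, H]
    rfl

theorem loopA_eq (xs : List Int) : ∀ (n i : Nat), xs.length - i = n → ∀ (R M : Int),
    CalsirLoopA xs i R M = foldA (stride3 (xs.drop i)) R M := by
  intro n
  induction n using Nat.strong_induction_on with
  | _ n ih =>
    intro i hn R M
    rw [CalsirLoopA]
    by_cases h : i < xs.length
    · rw [if_pos h]
      have hx : PySem.List.pyGetD xs (i : Int) 0 = xs[i] := by
        simp [PySem.List.pyGetD_of_nonneg, h]
      have hstr : stride3 (xs.drop i) = xs[i] :: stride3 (xs.drop (i + 3)) := by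
        rw [List.drop_eq_getElem_cons h]
        simp only [stride3, List.drop_drop]
      rw [hstr, foldA, hx]
      have hrec := ih (xs.length - (i + 3)) (by omega) (i + 3) rfl
      by_cases hgt : xs[i] > M
      · rw [if_pos hgt, if_pos hgt, hrec]
      · rw [if_neg hgt, if_neg hgt, hrec]
    · rw [if_neg h, List.drop_eq_nil_of_le (by omega : xs.length ≤ i), stride3, foldA]

theorem foldA_eq (l : List Int) : ∀ (R M : Int), foldA l R M = (R + smax M l, l.foldl max M) := by
  induction l with
  | nil => intro R M; simp [foldA, smax]
  | cons x t ih =>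
    intro R M
    by_cases h : x > M
    · have hm : max M x = x := by omega
      simp [foldA, smax, h, hm, ih]
    · have hm : max M x = M := by omega
      simp [foldA, smax, h, hm, ih]
      ring

theorem cmax_fold (l : List Int) : ∀ (pre : List Int) (M : Int),
    l.foldl (fun (acc : List Int × Int) x => (acc.1 ++ [max acc.2 x], max acc.2 x)) (pre, M) =
      (pre ++ cmax M l, l.foldl max M) := by
  induction l with
  | nil => intro pre M; simp [cmax]
  | cons x t ih => intro pre M; simp [cmax, ih]

theorem zip_cmax_sum (l : List Int) : ∀ (M c : Int),
    ((cmax M l).zip l).foldl (fun a p => a + (p.1 - p.2)) c = c + smax M l := by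
  induction l with
  | nil => intro M c; simp [cmax, smax]
  | cons x t ih => intro M c; simp [cmax, smax, ih]; ring

-- ===== VERDICT (by name: the statement is the Claim_ definition above) =====
theorem Calsir_spec : Claim_equal_Calsir := by
  intro xs _ _
  unfold Spec_Calsir Calsir Calsir_alt
  cases h1 : PySem.List.pyGet? xs ((xs.length : Int) - 1) with
  | none => rfl
  | some I0 =>
    cases h2 : PySem.List.pyGet? xs ((xs.length : Int) - 2) with
    | none => rfl
    | some v =>
      simp only [slice3_eq, Option.getD_some, loopA_eq, foldA_eq, cmax_fold]
      have : xs.drop 1 = xs.tail := by simp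
      rw [this]
      simp only [List.nil_append, zip_cmax_sum]
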